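-- pv_equiv track=rewrite | github.com/marcusf/aoc19 | 04.py | repeats_twice
-- ===== SOURCE A (Python) =====
-- def repeats_twice(cand):
--     ll = [1]
--     idx = 0
--     s = str(cand)
--     for i in range(len(s)-1):
--         if s[i] == s[i+1]:
--             ll[idx] += 1
--         else:
--             ll.append(1)
--             idx += 1
--     return 2 in ll
-- ===== SOURCE B (Python) =====
-- def repeats_twice(cand):
--     s = str(cand)
--     prev = s[0]
--     run = 1
--     for ch in s[1:]:
--         if ch == prev:
--             run += 1
--         else:
--             if run == 2:
--                 return True
--             prev = ch
--             run = 1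
--     return run == 2
-- ===== Notes on version B (the rewrite author's own statement) =====
-- stated objective: simpler
-- what changed: B replaces A's two-phase run-length-encode-into-a-list then '2 in ll' membership scan by a single pass keeping only the current run length and previous character, returning True early at the first run boundary whose run length is exactly 2.
import Mathlib
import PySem

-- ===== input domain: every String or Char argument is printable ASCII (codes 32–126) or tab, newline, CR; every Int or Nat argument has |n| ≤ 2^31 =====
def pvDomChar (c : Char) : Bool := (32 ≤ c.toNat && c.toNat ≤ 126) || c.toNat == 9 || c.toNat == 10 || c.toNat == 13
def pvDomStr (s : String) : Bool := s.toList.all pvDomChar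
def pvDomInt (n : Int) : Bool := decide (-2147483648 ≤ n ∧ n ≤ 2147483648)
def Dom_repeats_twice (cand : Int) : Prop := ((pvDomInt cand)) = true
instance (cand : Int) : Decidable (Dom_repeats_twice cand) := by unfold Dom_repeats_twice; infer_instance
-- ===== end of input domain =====

-- B replaces A's run-length list + membership scan by a single pass with a scalar run counter and early exit (objective: simpler, O(1) extra space).

-- ===== PORT A =====
-- Python: builds the run-length list ll while scanning adjacent pairs, then tests `2 in ll`.
-- Indices i, i+1 and idx are always in range in the Python, so the total pyGetD/pySetD forms are exact here.
def repeats_twice (cand : Int) : Bool :=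
  let s := (PySem.Int.toStr cand).toList
  let st := (PySem.List.pyRange 0 ((s.length : Int) - 1) 1).foldl
    (fun (st : List Int × Int) i =>
      if PySem.List.pyGetD s i ' ' = PySem.List.pyGetD s (i + 1) ' ' then
        (PySem.List.pySetD st.1 st.2 (PySem.List.pyGetD st.1 st.2 0 + 1), st.2)
      else
        (st.1 ++ [1], st.2 + 1))
    ([1], 0)
  decide ((2 : Int) ∈ st.1)

-- ===== PORT B =====
-- the `for ch in s[1:]` loop of Source B with early return, as structural recursion
def rtAltLoop (prev : Char) (run : Int) : List Char → Bool
  | [] => decide (run = 2)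
  | ch :: rest =>
    if ch = prev then rtAltLoop prev (run + 1) rest
    else if run = 2 then true
    else rtAltLoop ch 1 rest

-- s[0] is exact via pyGetD since str(cand) is never empty
def repeats_twice_alt (cand : Int) : Bool :=
  let s := (PySem.Int.toStr cand).toList
  rtAltLoop (PySem.List.pyGetD s 0 ' ') 1 (PySem.List.slice s (some 1) none)

-- ===== PRECONDITION & SPEC =====
def Spec_repeats_twice (cand : Int) (out : Bool) : Prop := out = repeats_twice_alt cand
instance (cand : Int) (out : Bool) : Decidable (Spec_repeats_twice cand out) := by unfold Spec_repeats_twice; infer_instance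

-- ===== CLAIM (what is proved, stated in full; the proofs are below) =====
def Claim_equal_repeats_twice : Prop := ∀ (cand : Int), Dom_repeats_twice cand → Spec_repeats_twice cand (repeats_twice cand)

-- ===== LEMMAS AND PROOFS =====

-- run-length encoding of `c` repeated `k` times followed by `rest`
def pvRunsGo (c : Char) (k : Int) : List Char → List Int
  | [] => [k]
  | d :: rest => if d = c then pvRunsGo c (k + 1) rest else k :: pvRunsGo d 1 rest

lemma rtAltLoop_eq_runs (rest : List Char) : ∀ (c : Char) (k : Int),
    rtAltLoop c k rest = decide ((2 : Int) ∈ pvRunsGo c k rest) := by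
  induction rest with
  | nil => intro c k; simp [rtAltLoop, pvRunsGo, eq_comm]
  | cons d rest ih =>
    intro c k
    by_cases h : d = c
    · simp [rtAltLoop, pvRunsGo, h, ih]
    · by_cases hk : k = 2 <;> simp [rtAltLoop, pvRunsGo, h, hk, ih, eq_comm]

lemma pvNatFold {β : Type} (g : β → Char → Char → β) (d : Char) :
    ∀ (s : List Char) (init : β),
      (List.range (s.length - 1)).foldl (fun acc k => g acc (s.getD k d) (s.getD (k + 1) d)) init
        = (s.zip s.tail).foldl (fun acc p => g acc p.1 p.2) init
  | [], init => by simp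
  | [c], init => by simp
  | c :: e :: r, init => by
    have ih := pvNatFold g d (e :: r) (g init c e)
    simp only [List.length_cons, Nat.add_sub_cancel] at ih ⊢
    rw [List.range_succ_eq_map, List.foldl_cons, List.foldl_map]
    simp only [Nat.succ_eq_add_one, List.getD_cons_zero, List.getD_cons_succ,
      List.zip_cons_cons, List.foldl_cons, List.tail_cons] at ih ⊢
    exact ih

lemma pvSetLastNat (acc : List Int) (k v : Int) :
    (acc ++ [k]).set acc.length v = acc ++ [v] := by
  induction acc with
  | nil => rfl
  | cons a acc ih => simp only [List.cons_append, List.length_cons, List.set_cons_succ, ih]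

lemma pvSetLast (acc : List Int) (k v : Int) :
    PySem.List.pySetD (acc ++ [k]) ((acc.length : Int)) v = acc ++ [v] := by
  rw [PySem.List.pySetD_natCast]
  exact pvSetLastNat acc k v

lemma pvGetLast (acc : List Int) (k : Int) :
    PySem.List.pyGetD (acc ++ [k]) ((acc.length : Int)) 0 = k := by
  rw [PySem.List.pyGetD_natCast]
  induction acc with
  | nil => rfl
  | cons a acc ih => simp only [List.cons_append, List.length_cons, List.getD_cons_succ]; exact ih

lemma pvAFold (rest : List Char) : ∀ (c : Char) (acc : List Int) (k : Int),
    (((c :: rest).zip rest).foldl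
      (fun (st : List Int × Int) (p : Char × Char) =>
        if p.1 = p.2 then
          (PySem.List.pySetD st.1 st.2 (PySem.List.pyGetD st.1 st.2 0 + 1), st.2)
        else (st.1 ++ [1], st.2 + 1))
      (acc ++ [k], (acc.length : Int))).1 = acc ++ pvRunsGo c k rest := by
  induction rest with
  | nil => intro c acc k; simp [pvRunsGo]
  | cons d rest ih =>
    intro c acc k
    by_cases h : d = c
    · subst h
      simpa [pvRunsGo, pvSetLast, pvGetLast] using ih d acc (k + 1)
    · have h' : ¬ c = d := fun e => h e.symm
      have hrec := ih d (acc ++ [k]) 1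
      simp only [List.length_append, List.length_cons, List.length_nil, Nat.cast_add,
        Nat.cast_one, Nat.cast_zero, List.append_assoc, List.cons_append, List.nil_append] at hrec
      simp only [pvRunsGo, h, if_false, List.zip_cons_cons, List.foldl_cons, h']
      rw [show acc ++ k :: pvRunsGo d 1 rest = (acc ++ [k]) ++ pvRunsGo d 1 rest by simp]
      simpa using hrec

lemma pvMain (s : List Char) :
    (decide ((2 : Int) ∈
      ((PySem.List.pyRange 0 ((s.length : Int) - 1) 1).foldl
        (fun (st : List Int × Int) i =>
          if PySem.List.pyGetD s i ' ' = PySem.List.pyGetD s (i + 1) ' ' then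
            (PySem.List.pySetD st.1 st.2 (PySem.List.pyGetD st.1 st.2 0 + 1), st.2)
          else (st.1 ++ [1], st.2 + 1))
        ([1], 0)).1))
      = rtAltLoop (PySem.List.pyGetD s 0 ' ') 1 (PySem.List.slice s (some 1) none) := by
  match s with
  | [] => decide
  | c :: rest =>
    have h1 : (((c :: rest).length : Int) - 1 - 0).toNat = (c :: rest).length - 1 := by
      simp
    have h2 := pvNatFold
      (fun (st : List Int × Int) a b =>
        if a = b then
          (PySem.List.pySetD st.1 st.2 (PySem.List.pyGetD st.1 st.2 0 + 1), st.2)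
        else (st.1 ++ [1], st.2 + 1)) ' ' (c :: rest) (([1], 0) : List Int × Int)
    simp only [List.tail_cons] at h2
    rw [PySem.List.pyRange_one, h1, List.foldl_map]
    simp only [zero_add, ← Nat.cast_succ, PySem.List.pyGetD_natCast]
    rw [h2]
    have hA := pvAFold rest c [] 1
    simp only [List.nil_append, List.length_nil, Nat.cast_zero] at hA
    rw [hA, PySem.List.slice_from_one]
    simp [rtAltLoop_eq_runs, PySem.List.pyGetD_zero_cons]

-- ===== VERDICT (by name: the statement is the Claim_ definition above) =====
theorem repeats_twice_spec : Claim_equal_repeats_twice := by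
  intro cand _
  unfold Spec_repeats_twice repeats_twice repeats_twice_alt
  exact pvMain ((PySem.Int.toStr cand).toList)
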